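-- pv_equiv track=rewrite | github.com/KaliostroKara/LR4-SysProg | main.py | find_epsilon_producing_non_terminal
-- ===== SOURCE A (Python) =====
-- def find_epsilon_producing_non_terminal(grammar):
--     """
--     Finds the non-terminals which produce epsilon in the given grammar.
--     """
--     epsilon_producers = set()
--
--     # Initial scan for direct producers
--     for non_terminal, productions in grammar.items():
--         for production in productions:
--             if production == 'ε' or production == '':
--                 epsilon_producers.add(non_terminal)
--
--     # Iterative scan for indirect producers
--     size_before = 0
--     while size_before != len(epsilon_producers):
--         size_before = len(epsilon_producers)
--
--         for non_terminal, productions in grammar.items():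
--             for production in productions:
--                 if all(symbol in epsilon_producers for symbol in production):
--                     epsilon_producers.add(non_terminal)
--                     break
--
--     return epsilon_producers
-- ===== SOURCE B (Python) =====
-- def find_epsilon_producing_non_terminal(grammar):
--     """
--     Finds the non-terminals which produce epsilon in the given grammar.
--     Counter/propagation scheme: each production keeps a counter of symbol
--     occurrences not yet known nullable, a reverse occurrence index maps a
--     symbol to the productions it appears in, and settling a non-terminal
--     decrements those counters; a production hitting zero marks its head
--     ready.  Sweeps only test the ready flag - no production is ever
--     re-scanned symbol by symbol.
--     """
--     producers = set()
--     need = {}      # (nt, j) -> number of symbol occurrences of production j of nt not yet nullable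
--     occ = {}       # symbol -> list of (nt, j) occurrences
--     ready = set()  # heads owning a production whose counter reached zero
--     direct = []    # heads with an epsilon production, in grammar order
--     pending = []   # the other heads, in grammar order
--
--     for nt, productions in grammar.items():
--         direct_here = False
--         for j, p in enumerate(productions):
--             if p == 'ε' or p == '':
--                 direct_here = True
--             else:
--                 need[(nt, j)] = len(p)
--                 for c in p:
--                     occ.setdefault(c, []).append((nt, j))
--         if direct_here:
--             direct.append(nt)
--         else:
--             pending.append(nt)
--
--     def settle(nt):
--         producers.add(nt)
--         for key in occ.get(nt, []):
--             need[key] -= 1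
--             if need[key] == 0:
--                 ready.add(key[0])
--
--     for nt in direct:
--         settle(nt)
--
--     changed = True
--     while changed:
--         changed = False
--         rest = []
--         for nt in pending:
--             if nt in ready:
--                 settle(nt)
--                 changed = True
--             else:
--                 rest.append(nt)
--         pending = rest
--
--     return producers
-- ===== Notes on version B (the rewrite author's own statement) =====
-- stated objective: alternative
-- what changed: B replaces A's repeated symbol-by-symbol rescans of every production with a counter/propagation scheme: a one-time reverse occurrence index plus per-production counters of not-yet-nullable symbol occurrences; settling a non-terminal decrements the counters of exactly the productions it occurs in and a counter hitting zero flags its head ready, so each sweep only tests a ready flag per still-pending head instead of re-evaluating all(symbol in producers) over every production.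
import Mathlib
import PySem

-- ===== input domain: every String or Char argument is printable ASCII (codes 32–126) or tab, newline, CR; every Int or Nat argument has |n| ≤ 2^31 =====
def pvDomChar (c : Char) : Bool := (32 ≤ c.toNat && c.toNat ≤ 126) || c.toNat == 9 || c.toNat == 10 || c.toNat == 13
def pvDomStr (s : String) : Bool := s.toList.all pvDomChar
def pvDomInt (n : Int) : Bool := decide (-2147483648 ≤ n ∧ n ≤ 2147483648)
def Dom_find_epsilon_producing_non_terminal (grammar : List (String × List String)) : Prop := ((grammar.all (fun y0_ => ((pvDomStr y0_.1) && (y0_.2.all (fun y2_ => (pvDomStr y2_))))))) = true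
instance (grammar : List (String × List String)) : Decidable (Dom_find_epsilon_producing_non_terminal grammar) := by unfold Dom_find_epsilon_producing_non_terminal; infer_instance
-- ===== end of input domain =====

-- B replaces A's repeated symbol-by-symbol rescans of every production by a
-- counter/propagation scheme: a reverse occurrence index and per-production
-- counters of not-yet-nullable symbol occurrences; settling a non-terminal
-- decrements the counters of the productions it occurs in, and a production
-- hitting zero marks its head ready, so sweeps only test a ready flag.

-- ===== PORT A =====
-- 'all(symbol in producers for symbol in production)' (iterating a Python string
-- yields its characters as 1-char strings)
def pvNullableNow (S : PySem.Set String) (p : String) : Bool :=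
  p.toList.all (fun c => PySem.Set.contains S (String.singleton c))

-- initial scan for direct producers
def pvInitA (grammar : List (String × List String)) : PySem.Set String :=
  grammar.foldl (fun S e =>
    e.2.foldl (fun S p => if p == "ε" || p == "" then PySem.Set.add S e.1 else S) S)
    PySem.Set.empty

-- body of A's inner 'for production …: if all(…): add; break'
def pvStepA (S : PySem.Set String) (e : String × List String) : PySem.Set String :=
  if e.2.any (pvNullableNow S) then PySem.Set.add S e.1 else S

-- A's 'while size_before != len(…)' loop; the fuel 'grammar.length + 1' is a
-- totality guard only: each continuing iteration strictly grows the set, which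
-- stays inside the key set, so the fixpoint is reached before the fuel runs out.
def pvLoopA (grammar : List (String × List String)) : Nat → PySem.Set String → PySem.Set String
  | 0, S => S
  | fuel+1, S =>
    let S' := grammar.foldl pvStepA S
    if S'.length == S.length then S' else pvLoopA grammar fuel S'

def find_epsilon_producing_non_terminal (grammar : List (String × List String)) : List String :=
  let S := pvInitA grammar
  if S.length == 0 then S else pvLoopA grammar (grammar.length + 1) S

-- ===== PORT B =====
-- indexing pass over one grammar entry: per-production occurrence counters
-- ('need'), the reverse occurrence index ('occ'), the direct/pending split
def pvIdxEntry
    (st : PySem.Dict (String × Int) Int × PySem.Dict String (List (String × Int)) × List String × List String)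
    (e : String × List String) :
    PySem.Dict (String × Int) Int × PySem.Dict String (List (String × Int)) × List String × List String :=
  let r := (PySem.List.enumerate e.2 0).foldl
    (fun (acc : PySem.Dict (String × Int) Int × PySem.Dict String (List (String × Int)) × Bool) jp =>
      if jp.2 == "ε" || jp.2 == "" then (acc.1, acc.2.1, true)
      else (acc.1.insert (e.1, jp.1) (PySem.Str.len jp.2),
            jp.2.toList.foldl
              (fun occ c => occ.modify (String.singleton c) [] (fun l => l ++ [(e.1, jp.1)]))
              acc.2.1,
            acc.2.2))
    (st.1, st.2.1, false)
  if r.2.2 then (r.1, r.2.1, st.2.2.1 ++ [e.1], st.2.2.2)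
  else (r.1, r.2.1, st.2.2.1, st.2.2.2 ++ [e.1])

-- 'settle': record nt as a producer and propagate decrements through occ;
-- a counter hitting zero marks its head ready
def pvSettle (occ : PySem.Dict String (List (String × Int)))
    (st : PySem.Set String × PySem.Dict (String × Int) Int × PySem.Set String) (nt : String) :
    PySem.Set String × PySem.Dict (String × Int) Int × PySem.Set String :=
  let producers := PySem.Set.add st.1 nt
  let nr := (occ.getD nt []).foldl
    (fun (nr : PySem.Dict (String × Int) Int × PySem.Set String) key =>
      let need := nr.1.modify key 0 (fun v => v - 1)
      (need, if need.getD key 0 == 0 then PySem.Set.add nr.2 key.1 else nr.2))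
    (st.2.1, st.2.2)
  (producers, nr.1, nr.2)

-- one pending head in a sweep: settle it if ready, else keep it
def pvSweepStep (occ : PySem.Dict String (List (String × Int)))
    (acc : (PySem.Set String × PySem.Dict (String × Int) Int × PySem.Set String) × List String × Bool)
    (nt : String) :
    (PySem.Set String × PySem.Dict (String × Int) Int × PySem.Set String) × List String × Bool :=
  if PySem.Set.contains acc.1.2.2 nt then (pvSettle occ acc.1 nt, acc.2.1, true)
  else (acc.1, acc.2.1 ++ [nt], acc.2.2)

-- B's 'while changed' loop; the same totality fuel as in A's port
def pvLoopB (occ : PySem.Dict String (List (String × Int))) :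
    Nat → (PySem.Set String × PySem.Dict (String × Int) Int × PySem.Set String) → List String →
    PySem.Set String
  | 0, st, _ => st.1
  | fuel+1, st, pending =>
    let r := pending.foldl (pvSweepStep occ) (st, [], false)
    if r.2.2 then pvLoopB occ fuel r.1 r.2.1 else r.1.1

def find_epsilon_producing_non_terminal_alt (grammar : List (String × List String)) : List String :=
  let ix := grammar.foldl pvIdxEntry (PySem.Dict.empty, PySem.Dict.empty, [], [])
  let st0 := ix.2.2.1.foldl (fun st nt => pvSettle ix.2.1 st nt)
    (PySem.Set.empty, ix.1, PySem.Set.empty)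
  pvLoopB ix.2.1 (grammar.length + 1) st0 ix.2.2.2

-- ===== PRECONDITION & SPEC =====
-- Pre_ excludes association lists with duplicate keys: the argument encodes a
-- Python dict, which cannot hold duplicate keys, so no Python input is lost.
def Pre_find_epsilon_producing_non_terminal (grammar : List (String × List String)) : Prop :=
  (grammar.map Prod.fst).Nodup
instance (grammar : List (String × List String)) : Decidable (Pre_find_epsilon_producing_non_terminal grammar) := by unfold Pre_find_epsilon_producing_non_terminal; infer_instance

def pvWitness_find_epsilon_producing_non_terminal : (List (String × List String)) :=
  [("S", ["AB", "a"]), ("A", ["S", ""]), ("B", ["b"])]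

def Spec_find_epsilon_producing_non_terminal (grammar : List (String × List String)) (out : List String) : Prop := out = find_epsilon_producing_non_terminal_alt grammar
instance (grammar : List (String × List String)) (out : List String) : Decidable (Spec_find_epsilon_producing_non_terminal grammar out) := by unfold Spec_find_epsilon_producing_non_terminal; infer_instance

-- ===== CLAIM (what is proved, stated in full; the proofs are below) =====
def Claim_equal_find_epsilon_producing_non_terminal : Prop := ∀ (grammar : List (String × List String)), Dom_find_epsilon_producing_non_terminal grammar → Pre_find_epsilon_producing_non_terminal grammar → Spec_find_epsilon_producing_non_terminal grammar (find_epsilon_producing_non_terminal grammar)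

-- ===== LEMMAS AND PROOFS =====

-- the ε/'' test both Pythons make, as a named predicate for the proofs
def pvDir (p : String) : Bool := p == "ε" || p == ""

-- number of symbol occurrences of p not yet known nullable
def pvRem (S : PySem.Set String) (p : String) : Nat :=
  (p.toList.filter (fun c => !(PySem.Set.contains S (String.singleton c)))).length

-- the occurrences of symbol s' contributed by productions ps (heads nt, from index s)
def pvChunk (nt : String) (s' : String) (ps : List String) (s : Int) : List (String × Int) :=
  (PySem.List.enumerate ps s).flatMap (fun jp =>
    if pvDir jp.2 then []
    else (jp.2.toList.filter (fun c => String.singleton c == s')).map (fun _ => (nt, jp.1)))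

-- the full reverse index entry for symbol s'
def pvOccSpec (g : List (String × List String)) (s' : String) : List (String × Int) :=
  g.flatMap (fun e => pvChunk e.1 s' e.2 0)

def pvDKeys (g : List (String × List String)) : List String :=
  (g.filter (fun e => e.2.any pvDir)).map Prod.fst

def pvNDKeys (g : List (String × List String)) : List String :=
  (g.filter (fun e => !(e.2.any pvDir))).map Prod.fst

theorem pv_occSpec_cons (e : String × List String) (t : List (String × List String)) (s' : String) :
    pvOccSpec (e :: t) s' = pvChunk e.1 s' e.2 0 ++ pvOccSpec t s' := by
  unfold pvOccSpec
  rw [List.flatMap_cons]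

theorem pv_dkeys_cons (e : String × List String) (t : List (String × List String)) :
    pvDKeys (e :: t) = (if e.2.any pvDir then [e.1] else []) ++ pvDKeys t := by
  unfold pvDKeys
  rw [List.filter_cons]
  split <;> simp_all

theorem pv_ndkeys_cons (e : String × List String) (t : List (String × List String)) :
    pvNDKeys (e :: t) = (if e.2.any pvDir then [] else [e.1]) ++ pvNDKeys t := by
  unfold pvNDKeys
  rw [List.filter_cons]
  by_cases hd : e.2.any pvDir = true <;> simp [hd]

-- counters agree with the residual counts w.r.t. the current producer set
def pvNeedInv (G : List (String × List String)) (S : PySem.Set String)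
    (need : PySem.Dict (String × Int) Int) : Prop :=
  ∀ e ∈ G, ∀ (j : Nat) (h : j < e.2.length), pvDir e.2[j] = false →
    need.getD (e.1, (j : Int)) 0 = (pvRem S e.2[j] : Int)

-- keys that belong to no non-direct production of G
def pvInvalid (G : List (String × List String)) (k : String × Int) : Prop :=
  ∀ e ∈ G, ∀ (j : Nat) (h : j < e.2.length), pvDir e.2[j] = false → k ≠ (e.1, (j : Int))

def pvNeed0 (G : List (String × List String)) (need : PySem.Dict (String × Int) Int) : Prop :=
  ∀ k, pvInvalid G k → need.getD k 0 = 0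

-- ready holds exactly the unsettled non-direct heads owning an exhausted production
def pvReadyInv (G : List (String × List String)) (S : PySem.Set String)
    (ready : PySem.Set String) : Prop :=
  ∀ e ∈ G, e.2.any pvDir = false → PySem.Set.contains S e.1 = false →
    (PySem.Set.contains ready e.1 = true ↔ ∃ (j : Nat) (h : j < e.2.length), pvRem S e.2[j] = 0)


-- ---- small set facts ----
theorem pv_any_false {l : List String} {f : String → Bool} (h : l.any f = false) :
    ∀ x ∈ l, f x = false := by
  intro x hx
  cases hfx : f x
  · rfl
  · rw [List.any_eq_true.mpr ⟨x, hx, hfx⟩] at h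
    cases h

theorem pv_contains_app {S t : List String} {x : String}
    (h : PySem.Set.contains S x = true) : PySem.Set.contains (S ++ t) x = true := by
  have hx : x ∈ S := by simpa [PySem.Set.contains] using h
  simp [PySem.Set.contains, List.mem_append, hx]

theorem pv_contains_add_self (S : PySem.Set String) (x : String) :
    PySem.Set.contains (PySem.Set.add S x) x = true := by
  by_cases hx : x ∈ S <;> simp [PySem.Set.add, PySem.Set.contains, hx]

theorem pv_add_of_contains {S : PySem.Set String} {x : String}
    (h : PySem.Set.contains S x = true) : PySem.Set.add S x = S := by
  have hx : x ∈ S := by simpa [PySem.Set.contains] using h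
  simp [PySem.Set.add, PySem.Set.contains, hx]

theorem pv_add_of_not_contains {S : PySem.Set String} {x : String}
    (h : PySem.Set.contains S x = false) : PySem.Set.add S x = S ++ [x] := by
  have hx : x ∉ S := by simpa [PySem.Set.contains] using h
  simp [PySem.Set.add, PySem.Set.contains, hx]

theorem pv_contains_add_iff {S : PySem.Set String} {x y : String} :
    PySem.Set.contains (PySem.Set.add S y) x = true ↔
      PySem.Set.contains S x = true ∨ x = y := by
  by_cases hy : PySem.Set.contains S y = true
  · rw [pv_add_of_contains hy]
    constructor
    · exact Or.inl
    · rintro (h | rfl)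
      · exact h
      · exact hy
  · rw [pv_add_of_not_contains (eq_false_of_ne_true hy)]
    simp [PySem.Set.contains]

theorem pv_contains_append_singleton_false {S : PySem.Set String} {x y : String}
    (h : PySem.Set.contains S x = false) (hxy : x ≠ y) :
    PySem.Set.contains (S ++ [y]) x = false := by
  have hx : x ∉ S := by simpa [PySem.Set.contains] using h
  simp [PySem.Set.contains, List.mem_append, hx, hxy]

-- ---- A-side sweep facts ----
theorem pv_stepA_ext (S : PySem.Set String) (e : String × List String) :
    ∃ t, pvStepA S e = S ++ t := by
  unfold pvStepA PySem.Set.add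
  split
  · split
    · exact ⟨[], by simp⟩
    · exact ⟨[e.1], rfl⟩
  · exact ⟨[], by simp⟩

theorem pv_sweepA_ext (l : List (String × List String)) :
    ∀ S : PySem.Set String, ∃ t, l.foldl pvStepA S = S ++ t := by
  induction l with
  | nil => exact fun S => ⟨[], by simp⟩
  | cons e l ih =>
    intro S
    obtain ⟨t1, h1⟩ := pv_stepA_ext S e
    obtain ⟨t2, h2⟩ := ih (pvStepA S e)
    exact ⟨t1 ++ t2, by rw [List.foldl_cons, h2, h1, List.append_assoc]⟩

theorem pv_sweepA_contains_mono {l : List (String × List String)}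
    {S : PySem.Set String} {x : String} (h : PySem.Set.contains S x = true) :
    PySem.Set.contains (l.foldl pvStepA S) x = true := by
  obtain ⟨t, ht⟩ := pv_sweepA_ext l S
  rw [ht]; exact pv_contains_app h

theorem pv_sweepA_subset (l : List (String × List String)) :
    ∀ (S : PySem.Set String) (x : String),
    PySem.Set.contains (l.foldl pvStepA S) x = true →
    PySem.Set.contains S x = true ∨ x ∈ l.map Prod.fst := by
  induction l with
  | nil => intro S x h; exact Or.inl h
  | cons e t ih =>
    intro S x h
    rcases ih (pvStepA S e) x h with h' | h'
    · unfold pvStepA at h'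
      split at h'
      · rcases pv_contains_add_iff.mp h' with h'' | rfl
        · exact Or.inl h''
        · exact Or.inr (by simp)
      · exact Or.inl h'
    · exact Or.inr (List.mem_cons_of_mem _ h')

theorem pv_stepA_settled {S : PySem.Set String} {e : String × List String}
    (h : PySem.Set.contains S e.1 = true) : pvStepA S e = S := by
  unfold pvStepA
  split
  · exact pv_add_of_contains h
  · rfl

-- A's inner direct-producer fold over one entry's productions = an 'any' test
theorem pv_fold_add_absorb (ps : List String) (S : PySem.Set String) (nt : String)
    (h : PySem.Set.contains S nt = true) :
    ps.foldl (fun S p => if p == "ε" || p == "" then PySem.Set.add S nt else S) S = S := by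
  induction ps with
  | nil => rfl
  | cons p ps ih =>
    simp only [List.foldl]
    split
    · rw [pv_add_of_contains h]; exact ih
    · exact ih

theorem pv_initA_entry (ps : List String) (S : PySem.Set String) (nt : String) :
    ps.foldl (fun S p => if p == "ε" || p == "" then PySem.Set.add S nt else S) S
      = if ps.any pvDir then PySem.Set.add S nt else S := by
  induction ps generalizing S with
  | nil => simp
  | cons p ps ih =>
    simp only [List.foldl, List.any_cons, pvDir]
    by_cases hp : (p == "ε" || p == "") = true
    · simp only [hp, if_true, Bool.true_or]
      exact pv_fold_add_absorb ps _ nt (pv_contains_add_self S nt)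
    · rw [if_neg hp]
      simp only [eq_false_of_ne_true hp, Bool.false_or]
      exact ih S

theorem pv_initA_eq_aux (g : List (String × List String)) :
    ∀ S : PySem.Set String, (∀ e ∈ g, PySem.Set.contains S e.1 = false) →
    (g.map Prod.fst).Nodup →
    g.foldl (fun S e =>
      e.2.foldl (fun S p => if p == "ε" || p == "" then PySem.Set.add S e.1 else S) S) S
      = S ++ pvDKeys g := by
  induction g with
  | nil => intro S _ _; simp [pvDKeys]
  | cons e t ih =>
    intro S hS hnd
    simp only [List.map_cons, List.nodup_cons] at hnd
    simp only [List.foldl_cons]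
    rw [pv_initA_entry]
    by_cases hd : e.2.any pvDir = true
    · rw [if_pos hd, pv_add_of_not_contains (hS e List.mem_cons_self)]
      rw [ih (S ++ [e.1]) ?later hnd.2]
      · simp [pvDKeys, hd]
      · intro e' he'
        have hne : e'.1 ≠ e.1 := fun hEq =>
          hnd.1 (hEq ▸ List.mem_map_of_mem he')
        exact pv_contains_append_singleton_false (hS e' (List.mem_cons_of_mem _ he')) hne
    · rw [if_neg hd, ih S (fun e' he' => hS e' (List.mem_cons_of_mem _ he')) hnd.2]
      simp only [pvDKeys, List.filter_cons, eq_false_of_ne_true hd]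
      rfl

theorem pv_initA_eq (g : List (String × List String))
    (hnd : (g.map Prod.fst).Nodup) : pvInitA g = pvDKeys g := by
  have := pv_initA_eq_aux g [] (fun e _ => by simp [PySem.Set.contains]) hnd
  simpa [pvInitA, PySem.Set.empty] using this

-- ---- residual counts ----
theorem pv_nullable_iff (S : PySem.Set String) (p : String) :
    pvNullableNow S p = true ↔ pvRem S p = 0 := by
  unfold pvNullableNow pvRem
  rw [List.length_eq_zero_iff, List.filter_eq_nil_iff, List.all_eq_true]
  constructor
  · intro h c hc
    have := h c hc
    simp only [PySem.Set.contains] at this ⊢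
    simp_all
  · intro h c hc
    have := h c hc
    simpa using this

theorem pv_anyNullable_iff (S : PySem.Set String) (ps : List String) :
    ps.any (pvNullableNow S) = true ↔ ∃ (j : Nat) (h : j < ps.length), pvRem S ps[j] = 0 := by
  rw [List.any_eq_true]
  constructor
  · rintro ⟨p, hp, hnull⟩
    obtain ⟨j, hj, rfl⟩ := List.mem_iff_getElem.mp hp
    exact ⟨j, hj, (pv_nullable_iff S _).mp hnull⟩
  · rintro ⟨j, hj, hz⟩
    exact ⟨ps[j], List.getElem_mem hj, (pv_nullable_iff S _).mpr hz⟩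

theorem pvRem_append {S : PySem.Set String} {nt : String}
    (h : PySem.Set.contains S nt = false) (p : String) :
    pvRem S p
      = pvRem (S ++ [nt]) p + (p.toList.filter (fun c => String.singleton c == nt)).length := by
  unfold pvRem
  induction p.toList with
  | nil => simp
  | cons c l ih =>
    simp only [List.filter_cons]
    by_cases hc : String.singleton c = nt
    · rw [hc]
      have h2 : PySem.Set.contains (S ++ [nt]) nt = true := by
        simp [PySem.Set.contains]
      simp only [h, h2, beq_self_eq_true, Bool.not_false, Bool.not_true, if_true,
        Bool.false_eq_true, if_false, List.length_cons]
      omega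
    · have h2 : PySem.Set.contains (S ++ [nt]) (String.singleton c)
          = PySem.Set.contains S (String.singleton c) := by
        simp [PySem.Set.contains, List.mem_append, hc]
      have h3 : (String.singleton c == nt) = false := by simp [hc]
      rw [h2, h3]
      cases hS : PySem.Set.contains S (String.singleton c) <;>
        simp only [Bool.not_false, Bool.not_true, if_true, Bool.false_eq_true, if_false,
          List.length_cons] <;> omega

theorem pvRem_empty (p : String) : pvRem [] p = p.toList.length := by
  unfold pvRem
  simp [PySem.Set.contains]

-- ---- the decrement fold inside settle ----
theorem pv_count_cons_ne {α : Type} [BEq α] [LawfulBEq α] {k k0 : α} (t : List α)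
    (h : k ≠ k0) : (k0 :: t).count k = t.count k := by
  simp [List.count_cons, h, Ne.symm h]

theorem pv_count_cons_self {α : Type} [BEq α] [LawfulBEq α] (k : α) (t : List α) :
    (k :: t).count k = t.count k + 1 := by
  simp [List.count_cons]

theorem pv_gl (l : List (String × Int)) :
    ∀ (need : PySem.Dict (String × Int) Int) (ready : PySem.Set String),
    (∀ k, (l.foldl
        (fun (nr : PySem.Dict (String × Int) Int × PySem.Set String) key =>
          let need := nr.1.modify key 0 (fun v => v - 1)
          (need, if need.getD key 0 == 0 then PySem.Set.add nr.2 key.1 else nr.2))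
        (need, ready)).1.getD k 0 = need.getD k 0 - l.count k)
    ∧ (∀ x, PySem.Set.contains (l.foldl
        (fun (nr : PySem.Dict (String × Int) Int × PySem.Set String) key =>
          let need := nr.1.modify key 0 (fun v => v - 1)
          (need, if need.getD key 0 == 0 then PySem.Set.add nr.2 key.1 else nr.2))
        (need, ready)).2 x = true ↔
        (PySem.Set.contains ready x = true ∨
          ∃ k ∈ l, k.1 = x ∧ 1 ≤ need.getD k 0 ∧ need.getD k 0 ≤ (l.count k : Int))) := by
  induction l with
  | nil =>
    intro need ready
    constructor
    · intro k; simp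
    · intro x; simp
  | cons k0 t ih =>
    intro need ready
    simp only [List.foldl_cons]
    obtain ⟨ihd, ihr⟩ := ih (need.modify k0 0 (fun v => v - 1))
      (if (need.modify k0 0 (fun v => v - 1)).getD k0 0 == 0
        then PySem.Set.add ready k0.1 else ready)
    have hmod : ∀ k, (need.modify k0 0 (fun v => v - 1)).getD k 0
        = if k = k0 then need.getD k0 0 - 1 else need.getD k 0 := by
      intro k; rw [PySem.Dict.getD_modify]
    constructor
    · intro k
      rw [ihd k, hmod k]
      by_cases hk : k = k0
      · subst hk
        rw [if_pos rfl, pv_count_cons_self]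
        push_cast; omega
      · rw [if_neg hk, pv_count_cons_ne t hk]
    · intro x
      rw [ihr x]
      have hr1 : PySem.Set.contains
          (if (need.modify k0 0 (fun v => v - 1)).getD k0 0 == 0
            then PySem.Set.add ready k0.1 else ready) x = true
          ↔ (PySem.Set.contains ready x = true ∨ (need.getD k0 0 = 1 ∧ x = k0.1)) := by
        rw [hmod k0, if_pos rfl]
        by_cases h0 : need.getD k0 0 - 1 = 0
        · rw [if_pos (by simpa using h0)]
          rw [pv_contains_add_iff]
          constructor
          · rintro (h | rfl)
            · exact Or.inl h
            · exact Or.inr ⟨by omega, rfl⟩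
          · rintro (h | ⟨_, rfl⟩)
            · exact Or.inl h
            · exact Or.inr rfl
        · rw [if_neg (by simpa using h0)]
          constructor
          · exact Or.inl
          · rintro (h | ⟨h1, _⟩)
            · exact h
            · omega
      rw [hr1]
      constructor
      · rintro ((h | ⟨h1, rfl⟩) | ⟨k, hkt, hx, h1, h2⟩)
        · exact Or.inl h
        · refine Or.inr ⟨k0, List.mem_cons_self, rfl, by omega, ?_⟩
          rw [pv_count_cons_self]
          push_cast; omega
        · rw [hmod k] at h1 h2
          by_cases hk : k = k0
          · subst hk
            simp only [if_pos rfl] at h1 h2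
            refine Or.inr ⟨k, List.mem_cons_self, hx, by omega, ?_⟩
            rw [pv_count_cons_self]
            push_cast; omega
          · simp only [if_neg hk] at h1 h2
            refine Or.inr ⟨k, List.mem_cons_of_mem _ hkt, hx, h1, ?_⟩
            rw [pv_count_cons_ne t hk]
            omega
      · rintro (h | ⟨k, hk, hx, h1, h2⟩)
        · exact Or.inl (Or.inl h)
        · by_cases hkk : k = k0
          · subst hkk
            rw [pv_count_cons_self] at h2
            by_cases hone : need.getD k 0 = 1
            · exact Or.inl (Or.inr ⟨hone, hx ▸ rfl⟩)
            · have hpos : (1 : Int) ≤ need.getD k 0 - 1 := by omega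
              have hcnt : need.getD k 0 - 1 ≤ (t.count k : Int) := by push_cast at h2 ⊢; omega
              have hmem : k ∈ t := by
                have : 0 < t.count k := by
                  by_contra hc
                  have : t.count k = 0 := by omega
                  rw [this] at hcnt
                  omega
                exact List.count_pos_iff.mp this
              refine Or.inr ⟨k, hmem, hx, ?_, ?_⟩ <;> rw [hmod k] <;> simp only [if_pos rfl]
              · exact hpos
              · exact hcnt
          · have hmem : k ∈ t := by
              rcases List.mem_cons.mp hk with rfl | h'
              · exact absurd rfl hkk
              · exact h'
            rw [pv_count_cons_ne t hkk] at h2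
            refine Or.inr ⟨k, hmem, hx, ?_, ?_⟩ <;> rw [hmod k] <;> simp only [if_neg hkk]
            · exact h1
            · exact h2

-- ---- occurrence-index characterisation ----
theorem pv_chunk_cons (nt s' p : String) (t : List String) (s : Int) :
    pvChunk nt s' (p :: t) s
      = (if pvDir p then []
          else (p.toList.filter (fun c => String.singleton c == s')).map (fun _ => (nt, s)))
        ++ pvChunk nt s' t (s+1) := by
  unfold pvChunk
  rw [PySem.List.enumerate_cons, List.flatMap_cons]

theorem pv_chunk_mem (nt s' : String) :
    ∀ (ps : List String) (s : Int) (k : String × Int), k ∈ pvChunk nt s' ps s →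
    k.1 = nt ∧ ∃ (j : Nat) (h : j < ps.length), k.2 = s + (j : Int) ∧ pvDir ps[j] = false := by
  intro ps
  induction ps with
  | nil => intro s k h; simp [pvChunk, PySem.List.enumerate_nil] at h
  | cons p t ih =>
    intro s k h
    rw [pvChunk, PySem.List.enumerate_cons, List.flatMap_cons] at h
    rcases List.mem_append.mp h with h' | h'
    · simp only at h'
      split at h'
      · simp at h'
      · rename_i hdir
        obtain ⟨c, hc, rfl⟩ := List.mem_map.mp h'
        exact ⟨rfl, 0, by simp, by simp, by simpa using hdir⟩
    · obtain ⟨h1, j, hj, h2, h3⟩ := ih (s+1) k h'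
      refine ⟨h1, j+1, by simpa using hj, by push_cast at h2 ⊢; omega, by simpa using h3⟩

theorem pv_chunk_count_lt (nt s' : String) :
    ∀ (ps : List String) (s : Int) (k : String × Int), k.2 < s →
    (pvChunk nt s' ps s).count k = 0 := by
  intro ps s k h
  rw [List.count_eq_zero]
  intro hmem
  obtain ⟨_, j, _, h2, _⟩ := pv_chunk_mem nt s' ps s k hmem
  omega

theorem pv_chunk_count_own (nt s' : String) :
    ∀ (ps : List String) (s : Int) (j : Nat) (h : j < ps.length), pvDir ps[j] = false →
    (pvChunk nt s' ps s).count (nt, s + (j : Int))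
      = (ps[j].toList.filter (fun c => String.singleton c == s')).length := by
  intro ps
  induction ps with
  | nil => intro s j h; simp at h
  | cons p t ih =>
    intro s j h hdir
    rw [pvChunk, PySem.List.enumerate_cons, List.flatMap_cons, List.count_append]
    have htail : pvChunk nt s' t (s+1) = (PySem.List.enumerate t (s+1)).flatMap
        (fun jp => if pvDir jp.2 then []
          else (jp.2.toList.filter (fun c => String.singleton c == s')).map (fun _ => (nt, jp.1))) := rfl
    rw [← htail]
    cases j with
    | zero =>
      simp only [List.getElem_cons_zero] at hdir ⊢
      have h0 : (pvChunk nt s' t (s+1)).count (nt, s + ((0:Nat) : Int)) = 0 := by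
        apply pv_chunk_count_lt
        simp
      rw [h0]
      simp [hdir, List.map_const', List.count_replicate]
    | succ j' =>
      simp only [List.getElem_cons_succ] at hdir ⊢
      have h1 : t.length > j' := by simpa using h
      have htl := ih (s+1) j' h1 hdir
      have hkk : ((nt, s + ((j'+1:Nat) : Int)) : String × Int) = (nt, s + 1 + (j' : Int)) := by
        push_cast
        rw [Prod.mk.injEq]
        exact ⟨rfl, by omega⟩
      rw [hkk, htl]
      have h0 : (List.count ((nt, s + 1 + (j' : Int)))
          ((fun (jp : Int × String) => if pvDir jp.2 then []
            else (jp.2.toList.filter (fun c => String.singleton c == s')).map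
              (fun _ => (nt, jp.1))) (s, p))) = 0 := by
        rw [List.count_eq_zero]
        intro hmem
        simp only at hmem
        split at hmem
        · simp at hmem
        · obtain ⟨c, _, heq⟩ := List.mem_map.mp hmem
          have : s + 1 + (j' : Int) = s := congrArg Prod.snd heq.symm
          omega
      rw [h0]
      omega

theorem pv_key_unique {g : List (String × List String)}
    (hnd : (g.map Prod.fst).Nodup) {e₁ e₂ : String × List String}
    (h₁ : e₁ ∈ g) (h₂ : e₂ ∈ g) (h : e₁.1 = e₂.1) : e₁ = e₂ := by
  induction g with
  | nil => cases h₁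
  | cons e t ih =>
    simp only [List.map_cons, List.nodup_cons] at hnd
    rcases List.mem_cons.mp h₁ with rfl | h₁' <;> rcases List.mem_cons.mp h₂ with rfl | h₂'
    · rfl
    · exact absurd (show e₁.1 ∈ t.map Prod.fst from h ▸ List.mem_map_of_mem h₂') hnd.1
    · exact absurd (show e₂.1 ∈ t.map Prod.fst from h ▸ List.mem_map_of_mem h₁') hnd.1
    · exact ih hnd.2 h₁' h₂' 

theorem pv_occ_mem {g : List (String × List String)} {s' : String} {k : String × Int}
    (h : k ∈ pvOccSpec g s') :
    ∃ e ∈ g, ∃ (j : Nat) (h : j < e.2.length), pvDir e.2[j] = false ∧ k = (e.1, (j : Int)) := by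
  obtain ⟨e, he, hk⟩ := List.mem_flatMap.mp h
  obtain ⟨h1, j, hj, h2, h3⟩ := pv_chunk_mem e.1 s' e.2 0 k hk
  refine ⟨e, he, j, hj, h3, ?_⟩
  rw [Prod.mk.injEq]
  exact ⟨h1, by omega⟩

theorem pv_occ_count {g : List (String × List String)}
    (hnd : (g.map Prod.fst).Nodup) {e : String × List String} (he : e ∈ g)
    (j : Nat) (h : j < e.2.length) (hdir : pvDir e.2[j] = false) (s' : String) :
    (pvOccSpec g s').count (e.1, (j : Int))
      = (e.2[j].toList.filter (fun c => String.singleton c == s')).length := by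
  induction g with
  | nil => cases he
  | cons a t ih =>
    simp only [List.map_cons, List.nodup_cons] at hnd
    rw [pvOccSpec, List.flatMap_cons, List.count_append]
    have hfold : (t.flatMap (fun e => pvChunk e.1 s' e.2 0)) = pvOccSpec t s' := rfl
    rw [hfold]
    rcases List.mem_cons.mp he with rfl | he'
    · have hown := pv_chunk_count_own e.1 s' e.2 0 j h hdir
      have hz : (0 : Int) + (j : Int) = (j : Int) := by omega
      rw [hz] at hown
      have h0 : (pvOccSpec t s').count (e.1, (j : Int)) = 0 := by
        rw [List.count_eq_zero]
        intro hmem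
        obtain ⟨e', he', _, _, _, hk⟩ := pv_occ_mem hmem
        rw [Prod.mk.injEq] at hk
        exact hnd.1 (hk.1 ▸ List.mem_map_of_mem he')
      rw [h0, hown]
      omega
    · have h0 : (pvChunk a.1 s' a.2 0).count (e.1, (j : Int)) = 0 := by
        rw [List.count_eq_zero]
        intro hmem
        obtain ⟨h1, _, _, _, _⟩ := pv_chunk_mem a.1 s' a.2 0 _ hmem
        have : e.1 ∈ t.map Prod.fst := List.mem_map_of_mem he'
        rw [h1] at this
        exact hnd.1 this
      rw [h0, ih hnd.2 he']
      omega

theorem pv_occ_count_invalid {g : List (String × List String)} {k : String × Int}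
    (h : pvInvalid g k) (s' : String) : (pvOccSpec g s').count k = 0 := by
  rw [List.count_eq_zero]
  intro hmem
  obtain ⟨e, he, j, hj, hdir, hk⟩ := pv_occ_mem hmem
  exact h e he j hj hdir hk

-- ---- characterisation of the indexing pass ----
-- proof-side name for the body of the inner production fold of pvIdxEntry
def pvIdxF (nt : String)
    (acc : PySem.Dict (String × Int) Int × PySem.Dict String (List (String × Int)) × Bool)
    (jp : Int × String) :
    PySem.Dict (String × Int) Int × PySem.Dict String (List (String × Int)) × Bool :=
  if jp.2 == "ε" || jp.2 == "" then (acc.1, acc.2.1, true)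
  else (acc.1.insert (nt, jp.1) (PySem.Str.len jp.2),
        jp.2.toList.foldl
          (fun occ c => occ.modify (String.singleton c) [] (fun l => l ++ [(nt, jp.1)]))
          acc.2.1,
        acc.2.2)

theorem pvIdxEntry_eq (st : PySem.Dict (String × Int) Int × PySem.Dict String (List (String × Int)) × List String × List String)
    (e : String × List String) :
    pvIdxEntry st e =
      (let r := (PySem.List.enumerate e.2 0).foldl (pvIdxF e.1) (st.1, st.2.1, false)
       if r.2.2 then (r.1, r.2.1, st.2.2.1 ++ [e.1], st.2.2.2)
       else (r.1, r.2.1, st.2.2.1, st.2.2.2 ++ [e.1])) := rfl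

theorem pv_idx_entry (nt : String) :
    ∀ (ps : List String) (s : Int) (need : PySem.Dict (String × Int) Int)
      (occ : PySem.Dict String (List (String × Int))) (b : Bool),
    ((PySem.List.enumerate ps s).foldl (pvIdxF nt) (need, occ, b)).2.2 = (b || ps.any pvDir)
    ∧ (∀ (j : Nat) (h : j < ps.length), pvDir ps[j] = false →
        ((PySem.List.enumerate ps s).foldl (pvIdxF nt) (need, occ, b)).1.getD (nt, s + (j : Int)) 0
          = PySem.Str.len ps[j])
    ∧ (∀ k : String × Int,
        (∀ (j : Nat) (h : j < ps.length), pvDir ps[j] = false → k ≠ (nt, s + (j : Int))) →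
        ((PySem.List.enumerate ps s).foldl (pvIdxF nt) (need, occ, b)).1.getD k 0
          = need.getD k 0)
    ∧ (∀ s' : String,
        ((PySem.List.enumerate ps s).foldl (pvIdxF nt) (need, occ, b)).2.1.getD s' []
          = occ.getD s' [] ++ pvChunk nt s' ps s) := by
  intro ps
  induction ps with
  | nil =>
    intro s need occ b
    refine ⟨by simp [PySem.List.enumerate_nil], ?_, ?_, ?_⟩
    · intro j h; simp at h
    · intro k _; simp [PySem.List.enumerate_nil]
    · intro s'; simp [PySem.List.enumerate_nil, pvChunk]
  | cons p t ih =>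
    intro s need occ b
    rw [PySem.List.enumerate_cons, List.foldl_cons]
    by_cases hd : pvDir p = true
    · have hstep : pvIdxF nt (need, occ, b) (s, p) = (need, occ, true) := by
        simp only [pvIdxF, pvDir] at hd ⊢
        rw [if_pos hd]
      rw [hstep]
      obtain ⟨f1, f2, f3, f4⟩ := ih (s+1) need occ true
      refine ⟨?_, ?_, ?_, ?_⟩
      · rw [f1]; simp [hd]
      · intro j h hdir
        cases j with
        | zero => simp only [List.getElem_cons_zero] at hdir; rw [hd] at hdir; cases hdir
        | succ j' =>
          simp only [List.getElem_cons_succ] at hdir ⊢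
          have hkk : s + ((j'+1 : Nat) : Int) = (s+1) + (j' : Int) := by push_cast; omega
          rw [hkk]
          exact f2 j' (by simpa using h) hdir
      · intro k hk
        refine f3 k ?_
        intro j h hdir
        have := hk (j+1) (by simpa using h) (by simpa using hdir)
        intro hEq
        apply this
        rw [hEq, Prod.mk.injEq]
        exact ⟨rfl, by push_cast; omega⟩
      · intro s'
        rw [f4 s', pv_chunk_cons]
        simp [hd]
    · have hd' : (p == "ε" || p == "") = false := by simpa [pvDir] using hd
      have hstep : pvIdxF nt (need, occ, b) (s, p)
          = (need.insert (nt, s) (PySem.Str.len p),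
             p.toList.foldl
               (fun occ c => occ.modify (String.singleton c) [] (fun l => l ++ [(nt, s)]))
               occ,
             b) := by
        simp only [pvIdxF]
        rw [if_neg (by simp [hd'])]
      rw [hstep]
      obtain ⟨f1, f2, f3, f4⟩ := ih (s+1) (need.insert (nt, s) (PySem.Str.len p))
        (p.toList.foldl
          (fun occ c => occ.modify (String.singleton c) [] (fun l => l ++ [(nt, s)])) occ) b
      refine ⟨?_, ?_, ?_, ?_⟩
      · rw [f1]; simp [pvDir, hd']
      · intro j h hdir
        cases j with
        | zero =>
          simp only [List.getElem_cons_zero] at hdir ⊢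
          have hpres := f3 (nt, s + ((0:Nat) : Int)) ?hcond
          case hcond =>
            intro j' h' hdir' hEq
            rw [Prod.mk.injEq] at hEq
            omega
          rw [hpres]
          have hz : s + ((0:Nat) : Int) = s := by push_cast; omega
          rw [hz, PySem.Dict.getD_insert_self]
        | succ j' =>
          simp only [List.getElem_cons_succ] at hdir ⊢
          have hkk : s + ((j'+1 : Nat) : Int) = (s+1) + (j' : Int) := by push_cast; omega
          rw [hkk]
          exact f2 j' (by simpa using h) hdir
      · intro k hk
        have hne : k ≠ (nt, s) := by
          have := hk 0 (by simp) (by simpa [pvDir] using hd')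
          simpa using this
        have := f3 k ?_
        · rw [this, PySem.Dict.getD_insert_of_ne]
          exact hne
        · intro j h hdir hEq
          have := hk (j+1) (by simpa using h) (by simpa using hdir)
          apply this
          rw [hEq, Prod.mk.injEq]
          exact ⟨rfl, by push_cast; omega⟩
      · intro s'
        rw [f4 s']
        have hfold2 : p.toList.foldl
            (fun occ c => occ.modify (String.singleton c) [] (fun l => l ++ [(nt, s)])) occ
            = (p.toList.map (fun c => (String.singleton c, ((nt, s) : String × Int)))).foldl
                (fun d q => d.modify q.1 [] (fun l => l ++ [q.2])) occ := by
          rw [List.foldl_map]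
        have hchar : (p.toList.foldl
            (fun occ c => occ.modify (String.singleton c) [] (fun l => l ++ [(nt, s)])) occ).getD s' []
            = occ.getD s' []
              ++ (p.toList.filter (fun c => String.singleton c == s')).map (fun _ => (nt, s)) := by
          rw [hfold2, PySem.Dict.getD_foldl_modify_append]
          congr 1
          rw [List.filter_map, List.map_map]
          rfl
        rw [hchar, pv_chunk_cons]
        simp [List.append_assoc]
        intro hcontra
        exact absurd hcontra hd

theorem pv_index_aux :
    ∀ (g : List (String × List String)) (need : PySem.Dict (String × Int) Int)
      (occ : PySem.Dict String (List (String × Int))) (dl pl : List String),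
    (g.map Prod.fst).Nodup →
    (∀ k : String × Int, pvInvalid g k →
      (g.foldl pvIdxEntry (need, occ, dl, pl)).1.getD k 0 = need.getD k 0)
    ∧ (∀ e ∈ g, ∀ (j : Nat) (h : j < e.2.length), pvDir e.2[j] = false →
        (g.foldl pvIdxEntry (need, occ, dl, pl)).1.getD (e.1, (j : Int)) 0 = PySem.Str.len e.2[j])
    ∧ (∀ s' : String,
        (g.foldl pvIdxEntry (need, occ, dl, pl)).2.1.getD s' [] = occ.getD s' [] ++ pvOccSpec g s')
    ∧ (g.foldl pvIdxEntry (need, occ, dl, pl)).2.2.1 = dl ++ pvDKeys g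
    ∧ (g.foldl pvIdxEntry (need, occ, dl, pl)).2.2.2 = pl ++ pvNDKeys g := by
  intro g
  induction g with
  | nil =>
    intro need occ dl pl _
    exact ⟨fun k _ => rfl, fun e he => absurd he (List.not_mem_nil), fun s' => by simp [pvOccSpec],
      by simp [pvDKeys], by simp [pvNDKeys]⟩
  | cons e t ih =>
    intro need occ dl pl hnd
    simp only [List.map_cons, List.nodup_cons] at hnd
    rw [List.foldl_cons, pvIdxEntry_eq]
    obtain ⟨f1, f2, f3, f4⟩ := pv_idx_entry e.1 e.2 0 need occ false
    simp only [f1, Bool.false_or]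
    by_cases hd : e.2.any pvDir = true
    · rw [if_pos hd]
      obtain ⟨g1, g2, g3, g4, g5⟩ := ih _ _ (dl ++ [e.1]) pl hnd.2
      refine ⟨?_, ?_, ?_, ?_, ?_⟩
      · intro k hk
        rw [g1 k (fun e' he' => hk e' (List.mem_cons_of_mem _ he'))]
        exact f3 k (fun j h hdir => by
          have := hk e List.mem_cons_self j h hdir
          simpa using this)
      · intro e' he' j h hdir
        rcases List.mem_cons.mp he' with rfl | he''
        · have hinv : pvInvalid t (e'.1, (j : Int)) := by
            intro a ha j' h' hdir' hEq
            rw [Prod.mk.injEq] at hEq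
            exact hnd.1 (hEq.1 ▸ List.mem_map_of_mem ha)
          rw [g1 _ hinv]
          have := f2 j h hdir
          simpa using this
        · exact g2 e' he'' j h hdir
      · intro s'
        rw [g3 s', f4 s', pv_occSpec_cons, List.append_assoc]
      · rw [g4, pv_dkeys_cons, if_pos hd, List.append_assoc]
      · rw [g5, pv_ndkeys_cons, if_pos hd, List.nil_append]
    · rw [if_neg hd]
      obtain ⟨g1, g2, g3, g4, g5⟩ := ih _ _ dl (pl ++ [e.1]) hnd.2
      refine ⟨?_, ?_, ?_, ?_, ?_⟩
      · intro k hk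
        rw [g1 k (fun e' he' => hk e' (List.mem_cons_of_mem _ he'))]
        exact f3 k (fun j h hdir => by
          have := hk e List.mem_cons_self j h hdir
          simpa using this)
      · intro e' he' j h hdir
        rcases List.mem_cons.mp he' with rfl | he''
        · have hinv : pvInvalid t (e'.1, (j : Int)) := by
            intro a ha j' h' hdir' hEq
            rw [Prod.mk.injEq] at hEq
            exact hnd.1 (hEq.1 ▸ List.mem_map_of_mem ha)
          rw [g1 _ hinv]
          have := f2 j h hdir
          simpa using this
        · exact g2 e' he'' j h hdir
      · intro s'
        rw [g3 s', f4 s', pv_occSpec_cons, List.append_assoc]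
      · rw [g4, pv_dkeys_cons, if_neg hd, List.nil_append]
      · rw [g5, pv_ndkeys_cons, if_neg hd, List.append_assoc]


-- ---- settle preserves the invariants ----
theorem pvSettle_spec {G : List (String × List String)}
    (hnd : (G.map Prod.fst).Nodup)
    {occ : PySem.Dict String (List (String × Int))}
    (hocc : ∀ s', occ.getD s' [] = pvOccSpec G s')
    {S : PySem.Set String} {need : PySem.Dict (String × Int) Int} {ready : PySem.Set String}
    {nt : String} (hnt : PySem.Set.contains S nt = false)
    (hN : pvNeedInv G S need) (hN0 : pvNeed0 G need) (hR : pvReadyInv G S ready) :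
    (pvSettle occ (S, need, ready) nt).1 = S ++ [nt]
    ∧ pvNeedInv G (S ++ [nt]) (pvSettle occ (S, need, ready) nt).2.1
    ∧ pvNeed0 G (pvSettle occ (S, need, ready) nt).2.1
    ∧ pvReadyInv G (S ++ [nt]) (pvSettle occ (S, need, ready) nt).2.2 := by
  obtain ⟨gd, gr⟩ := pv_gl (occ.getD nt []) need ready
  have hl : occ.getD nt [] = pvOccSpec G nt := hocc nt
  have hset : (pvSettle occ (S, need, ready) nt).1 = S ++ [nt] := by
    simp only [pvSettle]
    exact pv_add_of_not_contains hnt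
  have hneed : (pvSettle occ (S, need, ready) nt).2.1
      = ((occ.getD nt []).foldl
        (fun (nr : PySem.Dict (String × Int) Int × PySem.Set String) key =>
          let need := nr.1.modify key 0 (fun v => v - 1)
          (need, if need.getD key 0 == 0 then PySem.Set.add nr.2 key.1 else nr.2))
        (need, ready)).1 := rfl
  have hready : (pvSettle occ (S, need, ready) nt).2.2
      = ((occ.getD nt []).foldl
        (fun (nr : PySem.Dict (String × Int) Int × PySem.Set String) key =>
          let need := nr.1.modify key 0 (fun v => v - 1)
          (need, if need.getD key 0 == 0 then PySem.Set.add nr.2 key.1 else nr.2))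
        (need, ready)).2 := rfl
  refine ⟨hset, ?_, ?_, ?_⟩
  · intro e he j h hdir
    rw [hneed, gd, hl, pv_occ_count hnd he j h hdir nt, hN e he j h hdir]
    have := pvRem_append hnt e.2[j]
    omega
  · intro k hk
    rw [hneed, gd, hl, pv_occ_count_invalid hk nt, hN0 k hk]
    simp
  · intro e he hdA hS'
    have hS : PySem.Set.contains S e.1 = false := by
      cases hcs : PySem.Set.contains S e.1
      · rfl
      · rw [pv_contains_app hcs] at hS'; cases hS'
    have hall : ∀ p ∈ e.2, pvDir p = false := by
      intro p hp
      exact pv_any_false hdA p hp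
    rw [hready, gr e.1]
    constructor
    · rintro (hold | ⟨k, hkl, hkx, h1, h2⟩)
      · obtain ⟨j, hj, hz⟩ := (hR e he hdA hS).mp hold
        refine ⟨j, hj, ?_⟩
        have := pvRem_append hnt e.2[j]
        omega
      · rw [hl] at hkl
        obtain ⟨e', he', j, hj, hdir, rfl⟩ := pv_occ_mem hkl
        have he'e : e' = e := pv_key_unique hnd he' he hkx
        subst he'e
        rw [hl, pv_occ_count hnd he' j hj hdir nt] at h2
        rw [hN e' he' j hj hdir] at h1 h2
        refine ⟨j, hj, ?_⟩
        have := pvRem_append hnt e'.2[j]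
        omega
    · rintro ⟨j, hj, hz⟩
      by_cases h0 : pvRem S e.2[j] = 0
      · exact Or.inl ((hR e he hdA hS).mpr ⟨j, hj, h0⟩)
      · have hdir : pvDir e.2[j] = false := hall _ (List.getElem_mem hj)
        have hcnt := pv_occ_count hnd he j hj hdir nt
        have hra := pvRem_append hnt e.2[j]
        refine Or.inr ⟨(e.1, (j : Int)), ?_, rfl, ?_, ?_⟩
        · rw [hl]
          apply List.count_pos_iff.mp
          rw [hcnt]
          omega
        · rw [hN e he j hj hdir]; omega
        · rw [hN e he j hj hdir, hl, hcnt]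
          push_cast
          omega

-- ---- phase 1: settling the direct producers ----
theorem pv_direct_fold {G : List (String × List String)}
    (hnd : (G.map Prod.fst).Nodup)
    {occ : PySem.Dict String (List (String × Int))}
    (hocc : ∀ s', occ.getD s' [] = pvOccSpec G s') :
    ∀ (dl : List String) (S : PySem.Set String) (need : PySem.Dict (String × Int) Int)
      (ready : PySem.Set String),
    dl.Nodup → (∀ x ∈ dl, PySem.Set.contains S x = false) →
    pvNeedInv G S need → pvNeed0 G need → pvReadyInv G S ready →
    (dl.foldl (fun st nt => pvSettle occ st nt) (S, need, ready)).1 = S ++ dl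
    ∧ pvNeedInv G (S ++ dl) (dl.foldl (fun st nt => pvSettle occ st nt) (S, need, ready)).2.1
    ∧ pvNeed0 G (dl.foldl (fun st nt => pvSettle occ st nt) (S, need, ready)).2.1
    ∧ pvReadyInv G (S ++ dl) (dl.foldl (fun st nt => pvSettle occ st nt) (S, need, ready)).2.2 := by
  intro dl
  induction dl with
  | nil =>
    intro S need ready _ _ hN hN0 hR
    exact ⟨by simp, by simpa using hN, hN0, by simpa using hR⟩
  | cons nt t ih =>
    intro S need ready hdl hdisj hN hN0 hR
    rw [List.foldl_cons]
    obtain ⟨s1, s2, s3, s4⟩ := pvSettle_spec hnd hocc (hdisj nt List.mem_cons_self) hN hN0 hR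
    have hst : pvSettle occ (S, need, ready) nt
        = ((pvSettle occ (S, need, ready) nt).1, (pvSettle occ (S, need, ready) nt).2.1,
           (pvSettle occ (S, need, ready) nt).2.2) := rfl
    rw [hst, s1]
    simp only [List.nodup_cons] at hdl
    have hdisj' : ∀ x ∈ t, PySem.Set.contains (S ++ [nt]) x = false := by
      intro x hx
      exact pv_contains_append_singleton_false (hdisj x (List.mem_cons_of_mem _ hx))
        (fun hEq => hdl.1 (hEq ▸ hx))
    obtain ⟨r1, r2, r3, r4⟩ := ih (S ++ [nt]) _ _ hdl.2 hdisj' s2 s3 s4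
    refine ⟨by rw [r1, List.append_assoc]; rfl, ?_, r3, ?_⟩
    · rw [show S ++ nt :: t = (S ++ [nt]) ++ t by simp]
      exact r2
    · rw [show S ++ nt :: t = (S ++ [nt]) ++ t by simp]
      exact r4

-- pvNDKeys is a sublist of the key list
theorem pv_ndkeys_sublist (g : List (String × List String)) :
    (pvNDKeys g).Sublist (g.map Prod.fst) :=
  List.Sublist.map Prod.fst List.filter_sublist

-- ---- the sweep correspondence ----
theorem pv_sweep_main {G : List (String × List String)}
    (hndG : (G.map Prod.fst).Nodup)
    {occ : PySem.Dict String (List (String × Int))}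
    (hocc : ∀ s', occ.getD s' [] = pvOccSpec G s') :
    ∀ (g : List (String × List String)), g.Sublist G →
    ∀ (pend : List String), pend.Sublist (pvNDKeys g) →
    ∀ (S : PySem.Set String) (need : PySem.Dict (String × Int) Int) (ready : PySem.Set String)
      (still : List String) (c : Bool),
    pvNeedInv G S need → pvNeed0 G need → pvReadyInv G S ready →
    (∀ e ∈ g, e.1 ∈ pend ∨ PySem.Set.contains S e.1 = true) →
    (∀ x ∈ pend, PySem.Set.contains S x = false) →
    g.foldl pvStepA S = (pend.foldl (pvSweepStep occ) ((S, need, ready), still, c)).1.1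
    ∧ pvNeedInv G (g.foldl pvStepA S) (pend.foldl (pvSweepStep occ) ((S, need, ready), still, c)).1.2.1
    ∧ pvNeed0 G (pend.foldl (pvSweepStep occ) ((S, need, ready), still, c)).1.2.1
    ∧ pvReadyInv G (g.foldl pvStepA S) (pend.foldl (pvSweepStep occ) ((S, need, ready), still, c)).1.2.2
    ∧ (∃ keep, (pend.foldl (pvSweepStep occ) ((S, need, ready), still, c)).2.1 = still ++ keep
        ∧ keep.Sublist pend
        ∧ (∀ x ∈ pend, x ∈ keep ∨ PySem.Set.contains (g.foldl pvStepA S) x = true)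
        ∧ (∀ x ∈ keep, PySem.Set.contains (g.foldl pvStepA S) x = false))
    ∧ (pend.foldl (pvSweepStep occ) ((S, need, ready), still, c)).2.2
        = (c || !(g.foldl pvStepA S == S)) := by
  intro g
  induction g with
  | nil =>
    intro _ pend hpend S need ready still c hN hN0 hR hcov hdisj
    have hpe : pend = [] := List.sublist_nil.mp (by simpa [pvNDKeys] using hpend)
    subst hpe
    refine ⟨rfl, hN, hN0, hR, ⟨[], by simp, List.Sublist.refl _, by simp, by simp⟩, by simp⟩
  | cons e t ih =>
    intro hsub pend hpend S need ready still c hN hN0 hR hcov hdisj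
    have hndg : ((e :: t).map Prod.fst).Nodup := hndG.sublist (hsub.map Prod.fst)
    have hsubt : t.Sublist G := (List.sublist_cons_self e t).trans hsub
    have heG : e ∈ G := hsub.subset List.mem_cons_self
    have he1t : e.1 ∉ t.map Prod.fst := by
      simp only [List.map_cons, List.nodup_cons] at hndg
      exact hndg.1
    have hpendnd : pend.Nodup :=
      ((hndg.sublist (pv_ndkeys_sublist (e :: t))).sublist hpend)
    rw [List.foldl_cons]
    by_cases hd : e.2.any pvDir = true
    · -- direct entry: settled in phase 1, A's step is a no-op, pend untouched
      have hpend' : pend.Sublist (pvNDKeys t) := by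
        rwa [pv_ndkeys_cons, if_pos hd, List.nil_append] at hpend
      have he1p : e.1 ∉ pend := fun hmem =>
        he1t ((pv_ndkeys_sublist t).subset (hpend'.subset hmem))
      have hcontS : PySem.Set.contains S e.1 = true := by
        rcases hcov e List.mem_cons_self with h | h
        · exact absurd h he1p
        · exact h
      rw [pv_stepA_settled hcontS]
      exact ih hsubt pend hpend' S need ready still c hN hN0 hR
        (fun e' he' => hcov e' (List.mem_cons_of_mem _ he')) hdisj
    · have hd' : e.2.any pvDir = false := eq_false_of_ne_true hd
      rw [pv_ndkeys_cons, if_neg hd, List.singleton_append] at hpend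
      rcases List.sublist_cons_iff.mp hpend with hpend' | ⟨p', rfl, hp'⟩
      · -- e's head not pending: it must be settled already
        have he1p : e.1 ∉ pend := fun hmem =>
          he1t ((pv_ndkeys_sublist t).subset (hpend'.subset hmem))
        have hcontS : PySem.Set.contains S e.1 = true := by
          rcases hcov e List.mem_cons_self with h | h
          · exact absurd h he1p
          · exact h
        rw [pv_stepA_settled hcontS]
        exact ih hsubt pend hpend' S need ready still c hN hN0 hR
          (fun e' he' => hcov e' (List.mem_cons_of_mem _ he')) hdisj
      · -- e's head is the first pending entry
        have hS_e : PySem.Set.contains S e.1 = false := hdisj e.1 List.mem_cons_self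
        have he1p' : e.1 ∉ p' := (List.nodup_cons.mp hpendnd).1
        have hiff := hR e heG hd' hS_e
        rw [List.foldl_cons]
        by_cases hrd : PySem.Set.contains ready e.1 = true
        · -- fires: A adds it, B settles it
          have hfire : e.2.any (pvNullableNow S) = true :=
            (pv_anyNullable_iff S e.2).mpr (hiff.mp hrd)
          have hstepA : pvStepA S e = S ++ [e.1] := by
            unfold pvStepA
            rw [if_pos hfire]
            exact pv_add_of_not_contains hS_e
          have hstepB : pvSweepStep occ ((S, need, ready), still, c) e.1
              = (pvSettle occ (S, need, ready) e.1, still, true) := by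
            unfold pvSweepStep
            rw [if_pos hrd]
          obtain ⟨s1, s2, s3, s4⟩ := pvSettle_spec hndG hocc hS_e hN hN0 hR
          have hst : pvSettle occ (S, need, ready) e.1
              = ((pvSettle occ (S, need, ready) e.1).1, (pvSettle occ (S, need, ready) e.1).2.1,
                 (pvSettle occ (S, need, ready) e.1).2.2) := rfl
          rw [hstepA, hstepB, hst, s1]
          have hcov' : ∀ e' ∈ t, e'.1 ∈ p' ∨ PySem.Set.contains (S ++ [e.1]) e'.1 = true := by
            intro e' he'
            rcases hcov e' (List.mem_cons_of_mem _ he') with h | h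
            · rcases List.mem_cons.mp h with hEq | h'
              · exact absurd (hEq ▸ List.mem_map_of_mem he') he1t
              · exact Or.inl h'
            · exact Or.inr (pv_contains_app h)
          have hdisj' : ∀ x ∈ p', PySem.Set.contains (S ++ [e.1]) x = false := by
            intro x hx
            exact pv_contains_append_singleton_false (hdisj x (List.mem_cons_of_mem _ hx))
              (fun hEq => he1p' (hEq ▸ hx))
          obtain ⟨c1, c2, c3, c4, ⟨keep, k1, k2, k3, k4⟩, c6⟩ :=
            ih hsubt p' hp' (S ++ [e.1]) _ _ still true s2 s3 s4 hcov' hdisj'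
          have hcontF : PySem.Set.contains (t.foldl pvStepA (S ++ [e.1])) e.1 = true :=
            pv_sweepA_contains_mono (by simp [PySem.Set.contains])
          refine ⟨c1, c2, c3, c4, ⟨keep, k1, k2.trans (List.sublist_cons_self e.1 p'), ?_, k4⟩, ?_⟩
          · intro x hx
            rcases List.mem_cons.mp hx with rfl | hx'
            · exact Or.inr hcontF
            · exact k3 x hx'
          · rw [c6]
            obtain ⟨ext, hext⟩ := pv_sweepA_ext t (S ++ [e.1])
            have hne : t.foldl pvStepA (S ++ [e.1]) ≠ S := by
              rw [hext]
              intro hEq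
              have := congrArg List.length hEq
              simp [List.length_append] at this
            rw [beq_eq_false_iff_ne.mpr hne]
            simp
        · -- does not fire: A's step is a no-op, B keeps the head pending
          have hrd' : PySem.Set.contains ready e.1 = false := eq_false_of_ne_true hrd
          have hnofire : e.2.any (pvNullableNow S) = false := by
            cases hfa : e.2.any (pvNullableNow S)
            · rfl
            · rw [hiff.mpr ((pv_anyNullable_iff S e.2).mp hfa)] at hrd'
              cases hrd'
          have hstepA : pvStepA S e = S := by
            unfold pvStepA
            rw [if_neg (by simp [hnofire])]
          have hstepB : pvSweepStep occ ((S, need, ready), still, c) e.1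
              = ((S, need, ready), still ++ [e.1], c) := by
            unfold pvSweepStep
            rw [if_neg (by simpa [PySem.Set.contains] using hrd')]
          rw [hstepA, hstepB]
          have hcov'' : ∀ e' ∈ t, e'.1 ∈ p' ∨ PySem.Set.contains S e'.1 = true := by
            intro e' he'
            rcases hcov e' (List.mem_cons_of_mem _ he') with h | h
            · rcases List.mem_cons.mp h with hEq | h'
              · exact absurd (hEq ▸ List.mem_map_of_mem he') he1t
              · exact Or.inl h'
            · exact Or.inr h
          obtain ⟨c1, c2, c3, c4, ⟨keep, k1, k2, k3, k4⟩, c6⟩ :=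
            ih hsubt p' hp' S need ready (still ++ [e.1]) c hN hN0 hR hcov''
              (fun x hx => hdisj x (List.mem_cons_of_mem _ hx))
          have hcontF : PySem.Set.contains (t.foldl pvStepA S) e.1 = false := by
            cases hcf : PySem.Set.contains (t.foldl pvStepA S) e.1
            · rfl
            · rcases pv_sweepA_subset t S e.1 hcf with h | h
              · rw [h] at hS_e; cases hS_e
              · exact absurd h he1t
          refine ⟨c1, c2, c3, c4,
            ⟨e.1 :: keep, by rw [k1, List.append_assoc]; rfl, k2.cons₂ e.1, ?_, ?_⟩, c6⟩
          · intro x hx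
            rcases List.mem_cons.mp hx with rfl | hx'
            · exact Or.inl List.mem_cons_self
            · rcases k3 x hx' with h | h
              · exact Or.inl (List.mem_cons_of_mem _ h)
              · exact Or.inr h
          · intro x hx
            rcases List.mem_cons.mp hx with rfl | hx'
            · exact hcontF
            · exact k4 x hx'


-- ---- the two loops in lockstep ----
theorem pv_loop_main {G : List (String × List String)}
    (hndG : (G.map Prod.fst).Nodup)
    {occ : PySem.Dict String (List (String × Int))}
    (hocc : ∀ s', occ.getD s' [] = pvOccSpec G s') :
    ∀ (fuel : Nat) (S : PySem.Set String) (need : PySem.Dict (String × Int) Int)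
      (ready : PySem.Set String) (pend : List String),
    pend.Sublist (pvNDKeys G) →
    pvNeedInv G S need → pvNeed0 G need → pvReadyInv G S ready →
    (∀ e ∈ G, e.1 ∈ pend ∨ PySem.Set.contains S e.1 = true) →
    (∀ x ∈ pend, PySem.Set.contains S x = false) →
    pvLoopA G fuel S = pvLoopB occ fuel (S, need, ready) pend := by
  intro fuel
  induction fuel with
  | zero => intro S need ready pend _ _ _ _ _ _; rfl
  | succ fuel ihf =>
    intro S need ready pend hpend hN hN0 hR hcov hdisj
    obtain ⟨c1, c2, c3, c4, ⟨keep, k1, k2, k3, k4⟩, c6⟩ :=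
      pv_sweep_main hndG hocc G (List.Sublist.refl G) pend hpend S need ready [] false
        hN hN0 hR (fun e he => hcov e he) hdisj
    simp only [pvLoopA, pvLoopB]
    obtain ⟨ext, hext⟩ := pv_sweepA_ext G S
    by_cases hx : ext = []
    · subst hx
      rw [List.append_nil] at hext
      have heq : (G.foldl pvStepA S == S) = true := by rw [hext]; simp
      have hlen : ((G.foldl pvStepA S).length == S.length) = true := by rw [hext]; simp
      have hch : (pend.foldl (pvSweepStep occ) ((S, need, ready), [], false)).2.2 = false := by
        rw [c6, heq]; rfl
      rw [hlen, hch]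
      simp only [if_true, Bool.false_eq_true, if_false]
      rw [← c1]
    · have hlen : ((G.foldl pvStepA S).length == S.length) = false := by
        rw [hext]
        simp only [List.length_append, beq_eq_false_iff_ne]
        have : ext.length ≠ 0 := fun h0 => hx (List.length_eq_zero_iff.mp h0)
        omega
      have hne : G.foldl pvStepA S ≠ S := by
        rw [hext]
        intro hEq
        have := congrArg List.length hEq
        simp [List.length_append] at this
        exact hx this
      have hch : (pend.foldl (pvSweepStep occ) ((S, need, ready), [], false)).2.2 = true := by
        rw [c6, beq_eq_false_iff_ne.mpr hne]; rfl
      rw [hlen, hch]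
      simp only [Bool.false_eq_true, if_false, if_true]
      have hr1 : (pend.foldl (pvSweepStep occ) ((S, need, ready), [], false)).1
          = (G.foldl pvStepA S,
             (pend.foldl (pvSweepStep occ) ((S, need, ready), [], false)).1.2.1,
             (pend.foldl (pvSweepStep occ) ((S, need, ready), [], false)).1.2.2) := by
        rw [c1]
      have hrest : (pend.foldl (pvSweepStep occ) ((S, need, ready), [], false)).2.1 = keep := by
        rw [k1]; rfl
      rw [hr1, hrest]
      refine ihf _ _ _ keep (k2.trans hpend) c2 c3 c4 ?_ k4
      intro e he
      rcases hcov e he with h | h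
      · exact k3 e.1 h
      · exact Or.inr (by rw [hext]; exact pv_contains_app h)

-- with no direct producer nothing is nullable: one pass from the empty set adds nothing
theorem pv_foldA_nil (g : List (String × List String))
    (h : ∀ e ∈ g, e.2.any pvDir = false) : g.foldl pvStepA [] = [] := by
  induction g with
  | nil => rfl
  | cons e t ih =>
    rw [List.foldl_cons]
    have hnf : e.2.any (pvNullableNow ([] : PySem.Set String)) = false := by
      cases hfa : e.2.any (pvNullableNow ([] : PySem.Set String))
      · rfl
      · exfalso
        obtain ⟨p, hp, hnull⟩ := List.any_eq_true.mp hfa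
        have hdir : pvDir p = false := pv_any_false (h e List.mem_cons_self) p hp
        have hne : p ≠ "" := by
          intro hEq
          rw [hEq] at hdir
          simp [pvDir] at hdir
        have htl : p.toList ≠ [] := by
          intro hEq
          exact hne (String.toList_inj.mp (by simpa using hEq))
        unfold pvNullableNow at hnull
        cases hc : p.toList with
        | nil => exact absurd hc htl
        | cons a l =>
          rw [hc, List.all_cons] at hnull
          simp [PySem.Set.contains] at hnull
    have hstep : pvStepA [] e = [] := by
      unfold pvStepA
      rw [if_neg (by simp [hnf])]
    rw [hstep]
    exact ih (fun e' he' => h e' (List.mem_cons_of_mem _ he'))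

theorem pv_dkeys_sublist (g : List (String × List String)) :
    (pvDKeys g).Sublist (g.map Prod.fst) :=
  List.Sublist.map Prod.fst List.filter_sublist

-- ===== VERDICT (by name: the statement is the Claim_ definition above) =====
theorem find_epsilon_producing_non_terminal_spec : Claim_equal_find_epsilon_producing_non_terminal := by
  unfold Claim_equal_find_epsilon_producing_non_terminal
  intro g _ hpre
  unfold Spec_find_epsilon_producing_non_terminal
  unfold Pre_find_epsilon_producing_non_terminal at hpre
  obtain ⟨g1, g2, g3, g4, g5⟩ := pv_index_aux g PySem.Dict.empty PySem.Dict.empty [] [] hpre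
  simp only [List.nil_append] at g4 g5
  have hocc : ∀ s', (g.foldl pvIdxEntry
      (PySem.Dict.empty, PySem.Dict.empty, [], [])).2.1.getD s' [] = pvOccSpec g s' := by
    intro s'
    rw [g3 s']
    simp [PySem.Dict.getD_empty]
  have hN : pvNeedInv g [] (g.foldl pvIdxEntry (PySem.Dict.empty, PySem.Dict.empty, [], [])).1 := by
    intro e he j h hdir
    rw [g2 e he j h hdir, PySem.Str.len_eq, pvRem_empty]
  have hN0 : pvNeed0 g (g.foldl pvIdxEntry (PySem.Dict.empty, PySem.Dict.empty, [], [])).1 := by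
    intro k hk
    rw [g1 k hk]
    simp [PySem.Dict.getD_empty]
  have hR : pvReadyInv g [] ([] : PySem.Set String) := by
    intro e he hdA _
    apply iff_of_false
    · simp [PySem.Set.contains]
    · rintro ⟨j, hj, hz⟩
      rw [pvRem_empty] at hz
      have hemp : e.2[j] = "" := String.toList_inj.mp (by
        simpa using List.length_eq_zero_iff.mp hz)
      have hdir : pvDir e.2[j] = false := pv_any_false hdA e.2[j] (List.getElem_mem hj)
      rw [hemp] at hdir
      simp [pvDir] at hdir
  have hdknd : (pvDKeys g).Nodup := hpre.sublist (pv_dkeys_sublist g)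
  obtain ⟨p1, p2, p3, p4⟩ := pv_direct_fold hpre hocc (pvDKeys g) [] _ ([] : PySem.Set String)
    hdknd (fun x _ => by simp [PySem.Set.contains]) hN hN0 hR
  simp only [List.nil_append] at p1 p2 p4
  have hdisj : ∀ x ∈ pvNDKeys g, PySem.Set.contains (pvDKeys g) x = false := by
    intro x hx
    cases hc : PySem.Set.contains (pvDKeys g) x
    · rfl
    · exfalso
      have hxd : x ∈ pvDKeys g := by simpa [PySem.Set.contains] using hc
      obtain ⟨e₁, he₁, rfl⟩ := List.mem_map.mp hxd
      obtain ⟨e₂, he₂, hfst⟩ := List.mem_map.mp hx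
      rw [List.mem_filter] at he₁ he₂
      have : e₂ = e₁ := pv_key_unique hpre he₂.1 he₁.1 hfst
      rw [this] at he₂
      rw [he₁.2] at he₂
      simp at he₂
  simp only [find_epsilon_producing_non_terminal, find_epsilon_producing_non_terminal_alt,
    PySem.Set.empty]
  rw [g4, g5, pv_initA_eq g hpre]
  have hst0 : (pvDKeys g).foldl (fun st nt =>
      pvSettle (g.foldl pvIdxEntry (PySem.Dict.empty, PySem.Dict.empty, [], [])).2.1 st nt)
      (([] : PySem.Set String), (g.foldl pvIdxEntry (PySem.Dict.empty, PySem.Dict.empty, [], [])).1,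
        ([] : PySem.Set String))
      = (((pvDKeys g).foldl (fun st nt =>
            pvSettle (g.foldl pvIdxEntry (PySem.Dict.empty, PySem.Dict.empty, [], [])).2.1 st nt)
            (([] : PySem.Set String), (g.foldl pvIdxEntry (PySem.Dict.empty, PySem.Dict.empty, [], [])).1,
              ([] : PySem.Set String))).1,
         ((pvDKeys g).foldl (fun st nt =>
            pvSettle (g.foldl pvIdxEntry (PySem.Dict.empty, PySem.Dict.empty, [], [])).2.1 st nt)
            (([] : PySem.Set String), (g.foldl pvIdxEntry (PySem.Dict.empty, PySem.Dict.empty, [], [])).1,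
              ([] : PySem.Set String))).2.1,
         ((pvDKeys g).foldl (fun st nt =>
            pvSettle (g.foldl pvIdxEntry (PySem.Dict.empty, PySem.Dict.empty, [], [])).2.1 st nt)
            (([] : PySem.Set String), (g.foldl pvIdxEntry (PySem.Dict.empty, PySem.Dict.empty, [], [])).1,
              ([] : PySem.Set String))).2.2) := rfl
  rw [hst0, p1]
  by_cases hz : pvDKeys g = []
  · -- no direct producers: A returns the empty set without looping, B's first sweep is idle
    have hall : ∀ e ∈ g, e.2.any pvDir = false := by
      intro e he
      cases hd : e.2.any pvDir
      · rfl
      · exfalso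
        have : e.1 ∈ pvDKeys g := List.mem_map_of_mem (List.mem_filter.mpr ⟨he, hd⟩)
        rw [hz] at this
        cases this
    have hcov : ∀ e ∈ g, e.1 ∈ pvNDKeys g ∨ PySem.Set.contains ([] : PySem.Set String) e.1 = true := by
      intro e he
      exact Or.inl (List.mem_map_of_mem (List.mem_filter.mpr ⟨he, by simp [hall e he]⟩))
    rw [hz] at p1 p2 p3 p4 ⊢
    simp only [List.length_nil, Nat.zero_eq, beq_self_eq_true, if_true]
    obtain ⟨c1, c2, c3, c4, _, c6⟩ :=
      pv_sweep_main hpre hocc g (List.Sublist.refl g) (pvNDKeys g)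
        (List.Sublist.refl _) [] _ _ [] false p2 p3 p4 hcov
        (fun x _ => by simp [PySem.Set.contains])
    have hnilA : g.foldl pvStepA [] = [] := pv_foldA_nil g hall
    simp only [pvLoopB]
    rw [c6, hnilA]
    simp only [beq_self_eq_true, Bool.not_true, Bool.or_false, Bool.false_eq_true, if_false]
    rw [← c1, hnilA]
  · have hlz : ((pvDKeys g).length == 0) = false := by
      rw [beq_eq_false_iff_ne]
      intro h0
      exact hz (List.length_eq_zero_iff.mp h0)
    rw [hlz]
    simp only [Bool.false_eq_true, if_false]
    refine pv_loop_main hpre hocc (g.length + 1) (pvDKeys g) _ _ (pvNDKeys g)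
      (List.Sublist.refl _) p2 p3 p4 ?_ hdisj
    intro e he
    cases hd : e.2.any pvDir
    · exact Or.inl (List.mem_map_of_mem (List.mem_filter.mpr ⟨he, by simp [hd]⟩))
    · refine Or.inr ?_
      have : e.1 ∈ pvDKeys g := List.mem_map_of_mem (List.mem_filter.mpr ⟨he, hd⟩)
      simpa [PySem.Set.contains] using this
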